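-- pv_equiv track=rewrite | github.com/bsr-0/march-madness-forecaster | src/data/scrapers/roster_enrichment.py | compute_is_transfer
-- ===== SOURCE A (Python) =====
-- from typing import Any, Dict, List, Optional, Tuple
--
-- def compute_is_transfer(
--     player_key: str,
--     target_year: int,
--     target_team: str,
--     history: Dict[str, List[Tuple[int, str, float]]],
-- ) -> bool:
--     """Determine if player is a transfer in target_year.
--
--     True if player appeared on a DIFFERENT team in the most recent prior year.
--     False if same team or no prior year data (true freshman).
--     """
--     entries = history.get(player_key, [])
--     prior_entries = [(y, tid) for (y, tid, _) in entries if y < target_year]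
--     if not prior_entries:
--         return False  # true freshman / new to D1
--     most_recent_year = max(y for (y, _) in prior_entries)
--     teams_in_most_recent = set(tid for (y, tid) in prior_entries if y == most_recent_year)
--     return target_team not in teams_in_most_recent
-- ===== SOURCE B (Python) =====
-- def compute_is_transfer(player_key, target_year, target_team, history):
--     best_year = None
--     teams = set()
--     for (y, tid, _w) in history.get(player_key, []):
--         if y < target_year:
--             if best_year is None or y > best_year:
--                 best_year = y
--                 teams = {tid}
--             elif y == best_year:
--                 teams.add(tid)
--     if best_year is None:
--         return False
--     return target_team not in teams
-- ===== Notes on version B (the rewrite author's own statement) =====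
-- stated objective: alternative
-- what changed: Replaced the three passes (filter prior entries into a list, max over it, rebuild the most-recent-year team set) by one accumulating scan keeping the best prior year and its team set.
import Mathlib
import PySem

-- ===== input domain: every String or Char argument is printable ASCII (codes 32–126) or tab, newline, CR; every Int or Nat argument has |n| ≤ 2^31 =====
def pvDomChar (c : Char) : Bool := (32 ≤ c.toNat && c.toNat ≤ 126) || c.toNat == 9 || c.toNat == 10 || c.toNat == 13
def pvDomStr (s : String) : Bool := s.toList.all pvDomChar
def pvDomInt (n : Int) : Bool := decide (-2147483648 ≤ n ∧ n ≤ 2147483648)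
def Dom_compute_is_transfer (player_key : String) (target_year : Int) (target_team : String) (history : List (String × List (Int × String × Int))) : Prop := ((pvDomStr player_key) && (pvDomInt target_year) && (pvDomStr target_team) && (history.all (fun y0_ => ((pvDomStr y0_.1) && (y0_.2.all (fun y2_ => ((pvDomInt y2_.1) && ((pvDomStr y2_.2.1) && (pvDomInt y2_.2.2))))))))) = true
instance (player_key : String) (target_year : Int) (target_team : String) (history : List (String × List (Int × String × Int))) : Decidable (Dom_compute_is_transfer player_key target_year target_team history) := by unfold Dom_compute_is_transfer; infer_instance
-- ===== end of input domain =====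

-- B replaces A's three passes (filter prior entries into a list, max over it, rebuild
-- the most-recent-year team set) by one accumulating scan; objective: alternative decomposition.

-- ===== PORT A =====
def compute_is_transfer (player_key : String) (target_year : Int) (target_team : String) (history : List (String × List (Int × String × Int))) : Bool :=
  let entries := PySem.Dict.getD (PySem.Dict.mk history) player_key []
  let prior_entries := entries.filterMap (fun (e : Int × String × Int) => if e.1 < target_year then some (e.1, e.2.1) else none)
  if prior_entries = [] then
    false
  else
    match PySem.List.max? (prior_entries.map (fun p => p.1)) (fun y => y) with
    | none => false  -- unreachable: prior_entries ≠ []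
    | some most_recent_year =>
      let teams_in_most_recent : PySem.Set String :=
        PySem.Set.ofList (prior_entries.filterMap (fun (p : Int × String) => if p.1 = most_recent_year then some p.2 else none))
      !(PySem.Set.contains teams_in_most_recent target_team)

-- ===== PORT B =====
-- B-side helper: the body of B's single for-loop.
def ctStep (target_year : Int) (st : Option Int × PySem.Set String) (e : Int × String × Int) : Option Int × PySem.Set String :=
  if e.1 < target_year then
    match st.1 with
    | none => (some e.1, PySem.Set.ofList [e.2.1])
    | some b =>
      if e.1 > b then (some e.1, PySem.Set.ofList [e.2.1])
      else if e.1 = b then (st.1, PySem.Set.add st.2 e.2.1)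
      else st
  else st

def compute_is_transfer_alt (player_key : String) (target_year : Int) (target_team : String) (history : List (String × List (Int × String × Int))) : Bool :=
  let st := (PySem.Dict.getD (PySem.Dict.mk history) player_key []).foldl (ctStep target_year) (none, PySem.Set.empty)
  match st.1 with
  | none => false
  | some _ => !(PySem.Set.contains st.2 target_team)

-- ===== PRECONDITION & SPEC =====
def Spec_compute_is_transfer (player_key : String) (target_year : Int) (target_team : String) (history : List (String × List (Int × String × Int))) (out : Bool) : Prop := out = compute_is_transfer_alt player_key target_year target_team history
instance (player_key : String) (target_year : Int) (target_team : String) (history : List (String × List (Int × String × Int))) (out : Bool) : Decidable (Spec_compute_is_transfer player_key target_year target_team history out) := by unfold Spec_compute_is_transfer; infer_instance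

-- ===== CLAIM (what is proved, stated in full; the proofs are below) =====
def Claim_equal_compute_is_transfer : Prop := ∀ (player_key : String) (target_year : Int) (target_team : String) (history : List (String × List (Int × String × Int))), Dom_compute_is_transfer player_key target_year target_team history → Spec_compute_is_transfer player_key target_year target_team history (compute_is_transfer player_key target_year target_team history)

-- ===== LEMMAS AND PROOFS =====

-- A's prior_entries, as a function of the entry list.
def ctPrior (target_year : Int) (l : List (Int × String × Int)) : List (Int × String) :=
  l.filterMap (fun (e : Int × String × Int) => if e.1 < target_year then some (e.1, e.2.1) else none)

-- Loop invariant: the state of B's scan, characterised against A's prior list.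
def ctInv (prior : List (Int × String)) : Option Int × PySem.Set String → Prop
  | (none, _) => prior = []
  | (some m, s) => (∃ p ∈ prior, p.1 = m) ∧ (∀ p ∈ prior, p.1 ≤ m) ∧
      (∀ t, t ∈ s ↔ ∃ p ∈ prior, p.1 = m ∧ p.2 = t)

theorem ctPrior_cons (ty : Int) (e : Int × String × Int) (l : List (Int × String × Int)) :
    ctPrior ty (e :: l) = (if e.1 < ty then [(e.1, e.2.1)] else []) ++ ctPrior ty l := by
  by_cases h : e.1 < ty <;> simp [ctPrior, h]

theorem ctInv_step (ty : Int) (prior : List (Int × String)) (st : Option Int × PySem.Set String)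
    (e : Int × String × Int) (h : ctInv prior st) :
    ctInv (prior ++ if e.1 < ty then [(e.1, e.2.1)] else []) (ctStep ty st e) := by
  obtain ⟨b?, s⟩ := st
  by_cases hlt : e.1 < ty
  · rw [if_pos hlt]
    cases b? with
    | none =>
      have h' : prior = [] := h
      subst h'
      have hstep : ctStep ty (none, s) e = (some e.1, PySem.Set.ofList [e.2.1]) := by
        simp only [ctStep, if_pos hlt]
      rw [hstep]
      refine ⟨⟨(e.1, e.2.1), by simp⟩, by simp, fun t => ?_⟩
      simp [PySem.Set.mem_ofList, eq_comm]
    | some b =>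
      obtain ⟨⟨p0, hp0, hp0y⟩, hle, hmem⟩ := h
      by_cases hgt : e.1 > b
      · have hstep : ctStep ty (some b, s) e = (some e.1, PySem.Set.ofList [e.2.1]) := by
          simp only [ctStep, if_pos hlt]; rw [if_pos hgt]
        rw [hstep]
        refine ⟨⟨(e.1, e.2.1), by simp⟩, ?_, fun t => ?_⟩
        · intro p hp
          rcases List.mem_append.mp hp with hp | hp
          · exact le_of_lt (lt_of_le_of_lt (hle p hp) hgt)
          · simp at hp; simp [hp]
        · rw [PySem.Set.mem_ofList, List.mem_singleton]
          constructor
          · rintro rfl; exact ⟨(e.1, e.2.1), List.mem_append_right _ (by simp), rfl, rfl⟩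
          · rintro ⟨p, hp, hy, ht⟩
            rcases List.mem_append.mp hp with hp | hp
            · exact absurd hy (by have := hle p hp; omega)
            · simp at hp; rw [hp] at ht; exact ht.symm
      · by_cases heq : e.1 = b
        · have hstep : ctStep ty (some b, s) e = (some b, PySem.Set.add s e.2.1) := by
            simp only [ctStep, if_pos hlt]; rw [if_neg hgt, if_pos heq]
          rw [hstep]
          refine ⟨⟨p0, List.mem_append_left _ hp0, hp0y⟩, ?_, fun t => ?_⟩
          · intro p hp
            rcases List.mem_append.mp hp with hp | hp
            · exact hle p hp
            · simp at hp; simp [hp, heq]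
          · rw [PySem.Set.mem_add, hmem t]
            constructor
            · rintro (⟨p, hp, hy, ht⟩ | rfl)
              · exact ⟨p, List.mem_append_left _ hp, hy, ht⟩
              · exact ⟨(e.1, e.2.1), List.mem_append_right _ (by simp), heq, rfl⟩
            · rintro ⟨p, hp, hy, ht⟩
              rcases List.mem_append.mp hp with hp | hp
              · exact Or.inl ⟨p, hp, hy, ht⟩
              · simp at hp; rw [hp] at ht; exact Or.inr ht.symm
        · have hstep : ctStep ty (some b, s) e = (some b, s) := by
            simp only [ctStep, if_pos hlt]; rw [if_neg hgt, if_neg heq]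
          rw [hstep]
          refine ⟨⟨p0, List.mem_append_left _ hp0, hp0y⟩, ?_, fun t => ?_⟩
          · intro p hp
            rcases List.mem_append.mp hp with hp | hp
            · exact hle p hp
            · simp at hp; have hb : e.1 ≤ b := by omega
              simp [hp, hb]
          · rw [hmem t]
            constructor
            · rintro ⟨p, hp, hy, ht⟩; exact ⟨p, List.mem_append_left _ hp, hy, ht⟩
            · rintro ⟨p, hp, hy, ht⟩
              rcases List.mem_append.mp hp with hp | hp
              · exact ⟨p, hp, hy, ht⟩
              · simp at hp; rw [hp] at hy; simp at hy; omega
  · have hstep : ctStep ty (b?, s) e = (b?, s) := by simp only [ctStep, if_neg hlt]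
    rw [hstep, if_neg hlt, List.append_nil]
    exact h

theorem ctInv_foldl (ty : Int) (l : List (Int × String × Int)) (prior : List (Int × String))
    (st : Option Int × PySem.Set String) (h : ctInv prior st) :
    ctInv (prior ++ ctPrior ty l) (l.foldl (ctStep ty) st) := by
  induction l generalizing prior st with
  | nil => simpa [ctPrior] using h
  | cons e l ih =>
    have h2 := ih (prior ++ if e.1 < ty then [(e.1, e.2.1)] else []) (ctStep ty st e)
      (ctInv_step ty prior st e h)
    rw [List.append_assoc] at h2
    rw [List.foldl_cons, ctPrior_cons, ← List.append_assoc, List.append_assoc]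
    exact h2

theorem ct_main (ty : Int) (tt : String) (l : List (Int × String × Int)) :
    (if ctPrior ty l = [] then false
     else
       match PySem.List.max? ((ctPrior ty l).map (fun p => p.1)) (fun y => y) with
       | none => false
       | some m =>
         !(PySem.Set.contains
            (PySem.Set.ofList ((ctPrior ty l).filterMap (fun (p : Int × String) => if p.1 = m then some p.2 else none))) tt))
    = (match (l.foldl (ctStep ty) (none, PySem.Set.empty)).1 with
       | none => false
       | some _ => !(PySem.Set.contains (l.foldl (ctStep ty) (none, PySem.Set.empty)).2 tt)) := by
  have hinv := ctInv_foldl ty l [] (none, PySem.Set.empty) rfl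
  rw [List.nil_append] at hinv
  rcases hfold : l.foldl (ctStep ty) (none, PySem.Set.empty) with ⟨b?, s⟩
  rw [hfold] at hinv
  cases b? with
  | none =>
    have h' : ctPrior ty l = [] := hinv
    simp [h']
  | some m =>
    obtain ⟨⟨p0, hp0, hp0y⟩, hle, hmem⟩ := hinv
    have hne : ctPrior ty l ≠ [] := by
      intro hc; rw [hc] at hp0; exact absurd hp0 (List.not_mem_nil)
    rw [if_neg hne]
    have hmapne : (ctPrior ty l).map (fun p => p.1) ≠ [] := by simpa using hne
    obtain ⟨M, hM⟩ : ∃ M, PySem.List.max? ((ctPrior ty l).map (fun p => p.1)) (fun y => y) = some M := by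
      cases hx : PySem.List.max? ((ctPrior ty l).map (fun p => p.1)) (fun y => y) with
      | none => exact absurd (((PySem.List.max?_eq_none_iff _ _).mp hx)) hmapne
      | some M => exact ⟨M, rfl⟩
    have hMm : M = m := by
      obtain ⟨p, hp, hpy⟩ := List.mem_map.mp (PySem.List.max?_mem hM)
      have h1 : M ≤ m := hpy ▸ hle p hp
      have h2 : m ≤ M := PySem.List.max?_isMax hM m (List.mem_map.mpr ⟨p0, hp0, hp0y⟩)
      omega
    rw [hM, hMm]
    show (!PySem.Set.contains _ tt) = (!PySem.Set.contains s tt)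
    congr 1
    rw [Bool.eq_iff_iff, PySem.Set.contains_iff, PySem.Set.contains_iff, PySem.Set.mem_ofList,
      List.mem_filterMap, hmem tt]
    constructor
    · rintro ⟨p, hp, hif⟩
      by_cases hy : p.1 = m
      · rw [if_pos hy] at hif; exact ⟨p, hp, hy, Option.some.inj hif⟩
      · rw [if_neg hy] at hif; exact absurd hif (by simp)
    · rintro ⟨p, hp, hy, ht⟩
      exact ⟨p, hp, by rw [if_pos hy, ht]⟩

-- ===== VERDICT (by name: the statement is the Claim_ definition above) =====
theorem compute_is_transfer_spec : Claim_equal_compute_is_transfer := by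
  intro player_key target_year target_team history _
  exact ct_main target_year target_team (PySem.Dict.getD (PySem.Dict.mk history) player_key [])
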